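-- pv_equiv track=rewrite | github.com/yuxin101/skills | skills/prashamshah115/portfolio-risk-desk/src/intelligence_desk_brief/retrieval.py | _infer_factor
-- ===== SOURCE A (Python) =====
-- def _infer_factor(text_blob: str, themes: list[str], lane: str) -> str:
--     lowered = text_blob.lower()
--     if "rate" in lowered or "yield" in lowered or "fed" in lowered:
--         return "Rates and multiple compression sensitivity"
--     if "hedge fund" in lowered or "13f" in lowered or "fund letter" in lowered or "investor letter" in lowered:
--         return "Earnings revision sensitivity"
--     if "china" in lowered or "export" in lowered or "regulation" in lowered or "policy" in lowered:
--         return "China, regulation, or policy exposure"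
--     if "foundry" in lowered or "supply" in lowered or "lithography" in lowered or "asml" in lowered or "tsm" in lowered:
--         return "Supply-chain concentration or foundry dependence"
--     if "earnings" in lowered or "guidance" in lowered or "revenue" in lowered or "miss" in lowered:
--         return "Earnings revision sensitivity"
--     if "inventory" in lowered or "semiconductor" in lowered or "chip" in lowered or "demand" in lowered:
--         return "Semiconductor demand and inventory cycle exposure"
--     if "ai" in lowered or "infrastructure" in lowered or "capex" in lowered:
--         return "AI capex and infrastructure sensitivity"
--     if lane == "x_signals" and any(theme.lower() in lowered for theme in themes):
--         return "AI capex and infrastructure sensitivity"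
--     return "Unmapped live factor"
-- ===== SOURCE B (Python) =====
-- _KEYWORD_PRIORITY = {
--     "rate": 0, "yield": 0, "fed": 0,
--     "hedge fund": 1, "13f": 1, "fund letter": 1, "investor letter": 1,
--     "china": 2, "export": 2, "regulation": 2, "policy": 2,
--     "foundry": 3, "supply": 3, "lithography": 3, "asml": 3, "tsm": 3,
--     "earnings": 4, "guidance": 4, "revenue": 4, "miss": 4,
--     "inventory": 5, "semiconductor": 5, "chip": 5, "demand": 5,
--     "ai": 6, "infrastructure": 6, "capex": 6,
-- }
--
-- _LABELS = [
--     "Rates and multiple compression sensitivity",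
--     "Earnings revision sensitivity",
--     "China, regulation, or policy exposure",
--     "Supply-chain concentration or foundry dependence",
--     "Earnings revision sensitivity",
--     "Semiconductor demand and inventory cycle exposure",
--     "AI capex and infrastructure sensitivity",
-- ]
--
--
-- def _infer_factor(text_blob: str, themes: list[str], lane: str) -> str:
--     lowered = text_blob.lower()
--     # exhaustive matching: collect the priority of EVERY keyword present, then argmin
--     hits = [prio for kw, prio in _KEYWORD_PRIORITY.items() if kw in lowered]
--     if hits:
--         return _LABELS[min(hits)]
--     if lane == "x_signals" and any(theme.lower() in lowered for theme in themes):
--         return "AI capex and infrastructure sensitivity"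
--     return "Unmapped live factor"
-- ===== Notes on version B (the rewrite author's own statement) =====
-- stated objective: alternative
-- what changed: A's ordered short-circuit if-chain becomes an exhaustive pass over a flat keyword-to-priority map that collects the priorities of ALL keywords occurring in the lowered text and then selects the label of the minimum priority (argmin), with the lane/themes branch and default unchanged.
import Mathlib
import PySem

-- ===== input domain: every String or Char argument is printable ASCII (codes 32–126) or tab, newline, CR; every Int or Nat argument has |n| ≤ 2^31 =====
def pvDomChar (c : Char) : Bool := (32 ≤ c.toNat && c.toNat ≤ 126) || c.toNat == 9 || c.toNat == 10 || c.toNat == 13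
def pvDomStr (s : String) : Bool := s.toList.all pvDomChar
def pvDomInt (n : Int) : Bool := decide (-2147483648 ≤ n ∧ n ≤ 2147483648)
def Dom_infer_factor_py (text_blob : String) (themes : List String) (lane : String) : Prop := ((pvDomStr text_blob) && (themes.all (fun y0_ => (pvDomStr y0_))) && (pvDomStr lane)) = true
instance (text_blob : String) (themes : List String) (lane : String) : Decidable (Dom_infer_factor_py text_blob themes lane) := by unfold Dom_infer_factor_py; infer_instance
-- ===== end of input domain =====

-- B replaces A's ordered short-circuit if-chain by an exhaustive pass over a flat
-- keyword→priority map, collecting the priorities of all keywords present and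
-- selecting the label of the minimum (argmin); objective: alternative.

-- ===== PORT A =====
def infer_factor_py (text_blob : String) (themes : List String) (lane : String) : String :=
  let lowered := PySem.Str.lower text_blob
  if PySem.Str.isIn "rate" lowered || PySem.Str.isIn "yield" lowered || PySem.Str.isIn "fed" lowered then
    "Rates and multiple compression sensitivity"
  else if PySem.Str.isIn "hedge fund" lowered || PySem.Str.isIn "13f" lowered || PySem.Str.isIn "fund letter" lowered || PySem.Str.isIn "investor letter" lowered then
    "Earnings revision sensitivity"
  else if PySem.Str.isIn "china" lowered || PySem.Str.isIn "export" lowered || PySem.Str.isIn "regulation" lowered || PySem.Str.isIn "policy" lowered then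
    "China, regulation, or policy exposure"
  else if PySem.Str.isIn "foundry" lowered || PySem.Str.isIn "supply" lowered || PySem.Str.isIn "lithography" lowered || PySem.Str.isIn "asml" lowered || PySem.Str.isIn "tsm" lowered then
    "Supply-chain concentration or foundry dependence"
  else if PySem.Str.isIn "earnings" lowered || PySem.Str.isIn "guidance" lowered || PySem.Str.isIn "revenue" lowered || PySem.Str.isIn "miss" lowered then
    "Earnings revision sensitivity"
  else if PySem.Str.isIn "inventory" lowered || PySem.Str.isIn "semiconductor" lowered || PySem.Str.isIn "chip" lowered || PySem.Str.isIn "demand" lowered then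
    "Semiconductor demand and inventory cycle exposure"
  else if PySem.Str.isIn "ai" lowered || PySem.Str.isIn "infrastructure" lowered || PySem.Str.isIn "capex" lowered then
    "AI capex and infrastructure sensitivity"
  else if lane == "x_signals" && themes.any (fun theme => PySem.Str.isIn (PySem.Str.lower theme) lowered) then
    "AI capex and infrastructure sensitivity"
  else
    "Unmapped live factor"

-- ===== PORT B =====
-- the flat keyword → priority map of Source B (dict items in insertion order)
def pvKeywordPriority : List (String × Int) :=
  [("rate", 0), ("yield", 0), ("fed", 0),
   ("hedge fund", 1), ("13f", 1), ("fund letter", 1), ("investor letter", 1),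
   ("china", 2), ("export", 2), ("regulation", 2), ("policy", 2),
   ("foundry", 3), ("supply", 3), ("lithography", 3), ("asml", 3), ("tsm", 3),
   ("earnings", 4), ("guidance", 4), ("revenue", 4), ("miss", 4),
   ("inventory", 5), ("semiconductor", 5), ("chip", 5), ("demand", 5),
   ("ai", 6), ("infrastructure", 6), ("capex", 6)]

def pvLabels : List String :=
  ["Rates and multiple compression sensitivity",
   "Earnings revision sensitivity",
   "China, regulation, or policy exposure",
   "Supply-chain concentration or foundry dependence",
   "Earnings revision sensitivity",
   "Semiconductor demand and inventory cycle exposure",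
   "AI capex and infrastructure sensitivity"]

def infer_factor_py_alt (text_blob : String) (themes : List String) (lane : String) : String :=
  let lowered := PySem.Str.lower text_blob
  let hits := pvKeywordPriority.filterMap (fun kp => if PySem.Str.isIn kp.1 lowered then some kp.2 else none)
  -- 'if hits: return _LABELS[min(hits)]' — min? is none exactly when hits is empty;
  -- the priority is always 0..6 so the _LABELS index is in range and .getD is never taken
  match PySem.List.min? hits (fun x => x) with
  | some m => (PySem.List.pyGet? pvLabels m).getD ""
  | none =>
      if lane == "x_signals" && themes.any (fun theme => PySem.Str.isIn (PySem.Str.lower theme) lowered) then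
        "AI capex and infrastructure sensitivity"
      else
        "Unmapped live factor"

-- ===== PRECONDITION & SPEC =====
def Spec_infer_factor_py (text_blob : String) (themes : List String) (lane : String) (out : String) : Prop := out = infer_factor_py_alt text_blob themes lane
instance (text_blob : String) (themes : List String) (lane : String) (out : String) : Decidable (Spec_infer_factor_py text_blob themes lane out) := by unfold Spec_infer_factor_py; infer_instance

-- ===== CLAIM (what is proved, stated in full; the proofs are below) =====
def Claim_equal_infer_factor_py : Prop := ∀ (text_blob : String) (themes : List String) (lane : String), Dom_infer_factor_py text_blob themes lane → Spec_infer_factor_py text_blob themes lane (infer_factor_py text_blob themes lane)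

-- ===== LEMMAS AND PROOFS =====

-- foldl min stays at the initial value when every element is at least that value
theorem pv_foldl_min_of_le (p : Int) (t : List Int) (h : ∀ x ∈ t, p ≤ x) : t.foldl min p = p := by
  induction t with
  | nil => rfl
  | cons a t ih =>
      simp only [List.foldl_cons]
      have ha : p ≤ a := h a (by simp)
      rw [min_eq_left ha]
      exact ih (fun x hx => h x (by simp [hx]))

-- on a priority-sorted keyword list, the minimum matched priority is the priority of the FIRST match
theorem pv_min_hits_eq_find (l : List (String × Int)) (low : String)
    (h : List.Pairwise (fun a b : String × Int => a.2 ≤ b.2) l) :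
    PySem.List.min? (l.filterMap (fun kp => if PySem.Str.isIn kp.1 low then some kp.2 else none)) (fun x => x)
      = (l.find? (fun kp => PySem.Str.isIn kp.1 low)).map Prod.snd := by
  induction l with
  | nil => rfl
  | cons kp l ih =>
      rcases List.pairwise_cons.mp h with ⟨hle, hp⟩
      by_cases ht : PySem.Str.isIn kp.1 low = true
      · have ht' : PySem.Chars.isIn kp.1.toList low.toList = true := ht
        have hf : List.find? (fun kp : String × Int => PySem.Str.isIn kp.1 low) (kp :: l) = some kp := by
          simp [List.find?_cons, ht']
        have hmin : List.foldl min kp.2 (l.filterMap (fun kp => if PySem.Str.isIn kp.1 low then some kp.2 else none)) = kp.2 := by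
          apply pv_foldl_min_of_le
          intro x hx
          rcases List.mem_filterMap.mp hx with ⟨y, hy, hxy⟩
          have hx2 : x = y.2 := by
            by_cases h2 : PySem.Str.isIn y.1 low = true
            · rw [if_pos h2] at hxy; exact (Option.some.inj hxy).symm
            · rw [if_neg h2] at hxy; cases hxy
          exact hx2 ▸ hle y hy
        rw [hf, List.filterMap_cons, if_pos ht, PySem.List.min?_id_cons, hmin]
        rfl
      · have ht' : PySem.Chars.isIn kp.1.toList low.toList = false := by
          rw [← Bool.not_eq_true]; exact ht
        have hf : List.find? (fun kp : String × Int => PySem.Str.isIn kp.1 low) (kp :: l) = List.find? (fun kp : String × Int => PySem.Str.isIn kp.1 low) l := by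
          simp [List.find?_cons, ht']
        rw [hf, List.filterMap_cons, if_neg ht]
        exact ih hp

-- List.find? on a cons, phrased with if-then-else so the chain of tests is explicit
theorem pv_find?_cons_ite {α : Type} (p : α → Bool) (a : α) (l : List α) :
    List.find? p (a :: l) = if p a = true then some a else List.find? p l := by
  rw [List.find?_cons]
  cases hb : p a <;> simp [hb]

-- ===== VERDICT (by name: the statement is the Claim_ definition above) =====
set_option maxHeartbeats 2000000 in
theorem infer_factor_py_spec : Claim_equal_infer_factor_py := by
  intro text_blob themes lane _
  unfold Spec_infer_factor_py
  simp only [infer_factor_py, infer_factor_py_alt]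
  rw [pv_min_hits_eq_find _ _ (by decide)]
  simp only [pvKeywordPriority, pv_find?_cons_ite]
  generalize PySem.Str.lower text_blob = lo
  by_cases h0 : PySem.Str.isIn "rate" lo = true
  · simp_all <;> rfl
  by_cases h1 : PySem.Str.isIn "yield" lo = true
  · simp_all <;> rfl
  by_cases h2 : PySem.Str.isIn "fed" lo = true
  · simp_all <;> rfl
  by_cases h3 : PySem.Str.isIn "hedge fund" lo = true
  · simp_all <;> rfl
  by_cases h4 : PySem.Str.isIn "13f" lo = true
  · simp_all <;> rfl
  by_cases h5 : PySem.Str.isIn "fund letter" lo = true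
  · simp_all <;> rfl
  by_cases h6 : PySem.Str.isIn "investor letter" lo = true
  · simp_all <;> rfl
  by_cases h7 : PySem.Str.isIn "china" lo = true
  · simp_all <;> rfl
  by_cases h8 : PySem.Str.isIn "export" lo = true
  · simp_all <;> rfl
  by_cases h9 : PySem.Str.isIn "regulation" lo = true
  · simp_all <;> rfl
  by_cases h10 : PySem.Str.isIn "policy" lo = true
  · simp_all <;> rfl
  by_cases h11 : PySem.Str.isIn "foundry" lo = true
  · simp_all <;> rfl
  by_cases h12 : PySem.Str.isIn "supply" lo = true
  · simp_all <;> rfl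
  by_cases h13 : PySem.Str.isIn "lithography" lo = true
  · simp_all <;> rfl
  by_cases h14 : PySem.Str.isIn "asml" lo = true
  · simp_all <;> rfl
  by_cases h15 : PySem.Str.isIn "tsm" lo = true
  · simp_all <;> rfl
  by_cases h16 : PySem.Str.isIn "earnings" lo = true
  · simp_all <;> rfl
  by_cases h17 : PySem.Str.isIn "guidance" lo = true
  · simp_all <;> rfl
  by_cases h18 : PySem.Str.isIn "revenue" lo = true
  · simp_all <;> rfl
  by_cases h19 : PySem.Str.isIn "miss" lo = true
  · simp_all <;> rfl
  by_cases h20 : PySem.Str.isIn "inventory" lo = true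
  · simp_all <;> rfl
  by_cases h21 : PySem.Str.isIn "semiconductor" lo = true
  · simp_all <;> rfl
  by_cases h22 : PySem.Str.isIn "chip" lo = true
  · simp_all <;> rfl
  by_cases h23 : PySem.Str.isIn "demand" lo = true
  · simp_all <;> rfl
  by_cases h24 : PySem.Str.isIn "ai" lo = true
  · simp_all <;> rfl
  by_cases h25 : PySem.Str.isIn "infrastructure" lo = true
  · simp_all <;> rfl
  by_cases h26 : PySem.Str.isIn "capex" lo = true
  · simp_all <;> rfl
  simp_all <;> rfl
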